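-- pv_equiv track=rewrite | github.com/llowe10/ITSC3155_SPRING2021_800988013 | PythonBasics1/pythonBasics1.py | is_power_of
-- ===== SOURCE A (Python) =====
-- def is_power_of(i,j):
--     if(i == j):
--         return True
--     it = 0
--     k = abs(j)
--     for it in range(it,k):
--         if (i**it == j):
--             return True
--         it = it+1
--     return False
-- ===== SOURCE B (Python) =====
-- def is_power_of(i, j):
--     if j == 1:
--         return True
--     if abs(i) <= 1:
--         return j == i
--     p = i
--     while abs(p) < abs(j):
--         p *= i
--     return p == j
-- ===== Notes on version B (the rewrite author's own statement) =====
-- stated objective: faster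
-- what changed: Instead of trying every exponent from 0 to |j|-1 and recomputing i**it from scratch each time, B multiplies an accumulator by i until its magnitude reaches |j| (with constant-time answers for j==1 and |i|<=1), giving O(log |j|) iterations.
import Mathlib
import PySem

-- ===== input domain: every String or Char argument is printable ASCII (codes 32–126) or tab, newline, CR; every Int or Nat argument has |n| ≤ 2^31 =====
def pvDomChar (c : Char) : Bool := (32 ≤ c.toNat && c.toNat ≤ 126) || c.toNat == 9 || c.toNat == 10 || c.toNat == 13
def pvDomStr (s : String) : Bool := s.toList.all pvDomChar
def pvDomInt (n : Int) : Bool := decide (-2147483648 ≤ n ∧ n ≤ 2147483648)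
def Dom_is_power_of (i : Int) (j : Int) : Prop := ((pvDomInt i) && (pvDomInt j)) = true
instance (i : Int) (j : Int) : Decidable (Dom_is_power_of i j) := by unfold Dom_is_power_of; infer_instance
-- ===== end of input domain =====

-- B replaces A's scan of all exponents 0..|j|-1 (recomputing i**it each time) by one
-- accumulator repeatedly multiplied by i with an early exit once |p| ≥ |j| (objective: faster).

-- ===== PORT A =====
-- the 'for it in range(it, k)' loop: try each exponent in order, early return on a hit
-- (the dead 'it = it+1' inside A's body is overwritten by the for statement and has no effect)
def isPowAux (i j : Int) : List Nat → Bool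
  | [] => false
  | it :: rest => if i ^ it = j then true else isPowAux i j rest

def is_power_of (i : Int) (j : Int) : Bool :=
  if i = j then true
  else isPowAux i j (List.range j.natAbs)

-- ===== PORT B =====
-- the 'while abs(p) < abs(j): p *= i' loop; the invariants 2 ≤ |i| and 1 ≤ |p| (true at the
-- call site and preserved) are carried as proof arguments only to justify termination
def bLoop (i j : Int) (hi : 2 ≤ i.natAbs) : (p : Int) → 1 ≤ p.natAbs → Bool := fun p hp =>
  if h : p.natAbs < j.natAbs then
    bLoop i j hi (p * i)
      (by rw [Int.natAbs_mul]; calc 1 ≤ 1 * 2 := by omega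
            _ ≤ p.natAbs * i.natAbs := Nat.mul_le_mul hp hi)
  else decide (p = j)
termination_by p => j.natAbs - p.natAbs
decreasing_by
  have h2 : p.natAbs * 2 ≤ p.natAbs * i.natAbs := Nat.mul_le_mul_left _ hi
  rw [Int.natAbs_mul]; omega

def is_power_of_alt (i : Int) (j : Int) : Bool :=
  if j = 1 then true
  else if h : i.natAbs ≤ 1 then decide (j = i)
  else bLoop i j (by omega) i (by omega)

-- ===== PRECONDITION & SPEC =====
def Spec_is_power_of (i : Int) (j : Int) (out : Bool) : Prop := out = is_power_of_alt i j
instance (i : Int) (j : Int) (out : Bool) : Decidable (Spec_is_power_of i j out) := by unfold Spec_is_power_of; infer_instance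

-- ===== CLAIM (what is proved, stated in full; the proofs are below) =====
def Claim_equal_is_power_of : Prop := ∀ (i : Int) (j : Int), Dom_is_power_of i j → Spec_is_power_of i j (is_power_of i j)

-- ===== LEMMAS AND PROOFS =====

lemma isPowAux_true_iff (i j : Int) (l : List Nat) :
    isPowAux i j l = true ↔ ∃ e ∈ l, i ^ e = j := by
  induction l with
  | nil => simp [isPowAux]
  | cons a l ih =>
    simp only [isPowAux, List.mem_cons]
    split_ifs with h
    · simp [h]
    · simp only [ih]
      constructor
      · rintro ⟨e, he, hej⟩; exact ⟨e, Or.inr he, hej⟩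
      · rintro ⟨e, he | he, hej⟩
        · exact absurd (he ▸ hej) h
        · exact ⟨e, he, hej⟩

lemma A_true_iff (i j : Int) : is_power_of i j = true ↔ ∃ e : Nat, i ^ e = j := by
  unfold is_power_of
  split_ifs with hij
  · simp only [true_iff]; exact ⟨1, by simp [hij]⟩
  · rw [isPowAux_true_iff]
    constructor
    · rintro ⟨e, _, he⟩; exact ⟨e, he⟩
    · rintro ⟨e, he⟩
      by_cases h2 : 2 ≤ i.natAbs
      · refine ⟨e, ?_, he⟩
        have hj : j.natAbs = i.natAbs ^ e := by rw [← he, Int.natAbs_pow]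
        have hp : 2 ^ e ≤ i.natAbs ^ e := Nat.pow_le_pow_left h2 e
        have hlt : e < 2 ^ e := Nat.lt_two_pow_self
        simp only [List.mem_range]; omega
      · have hi : i = 0 ∨ i = 1 ∨ i = -1 := by omega
        rcases hi with rfl | rfl | rfl
        · cases e with
          | zero =>
            refine ⟨0, ?_, he⟩
            have : j = 1 := by simpa using he.symm
            simp [this]
          | succ e =>
            exfalso; apply hij
            rw [← he, zero_pow (Nat.succ_ne_zero e)]
        · exact absurd (by simpa using he.symm) (Ne.symm hij)
        · rcases Nat.even_or_odd e with hpar | hpar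
          · refine ⟨0, ?_, ?_⟩
            · have : j = 1 := by rw [← he, hpar.neg_one_pow]
              simp [this]
            · rw [← he, hpar.neg_one_pow, pow_zero]
          · exfalso; apply hij
            rw [← he, hpar.neg_one_pow]

lemma bLoop_true_iff (i j : Int) (hi : 2 ≤ i.natAbs) (p : Int) (hp : 1 ≤ p.natAbs) :
    bLoop i j hi p hp = true ↔ ∃ e : Nat, p * i ^ e = j := by
  induction p, hp using bLoop.induct i j hi with
  | case1 p hp h ih =>
    rw [bLoop, dif_pos h, ih]
    constructor
    · rintro ⟨e, he⟩; exact ⟨e + 1, by rw [← he]; ring⟩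
    · rintro ⟨e, he⟩
      cases e with
      | zero =>
        exfalso
        have : p = j := by simpa using he
        subst this; omega
      | succ e => exact ⟨e, by rw [← he]; ring⟩
  | case2 p hp h =>
    rw [bLoop, dif_neg h]; simp only [decide_eq_true_eq]
    constructor
    · rintro rfl; exact ⟨0, by simp⟩
    · rintro ⟨e, he⟩
      have hj : j.natAbs = p.natAbs * i.natAbs ^ e := by
        rw [← he, Int.natAbs_mul, Int.natAbs_pow]
      have h1 : 1 ≤ i.natAbs ^ e := Nat.one_le_pow e _ (by omega)
      have hmul : p.natAbs * 1 ≤ p.natAbs * i.natAbs ^ e := Nat.mul_le_mul_left _ h1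
      have ht : i.natAbs ^ e = 1 := by nlinarith
      have he0 : e = 0 := by
        rcases (Nat.pow_eq_one.mp ht) with h' | h'
        · omega
        · exact h'
      subst he0; simpa using he

lemma B_true_iff (i j : Int) : is_power_of_alt i j = true ↔ ∃ e : Nat, i ^ e = j := by
  unfold is_power_of_alt
  split_ifs with hj hi
  · simp only [true_iff]; exact ⟨0, by simp [hj]⟩
  · simp only [decide_eq_true_eq]
    constructor
    · rintro rfl; exact ⟨1, pow_one _⟩
    · rintro ⟨e, he⟩
      have hi3 : i = 0 ∨ i = 1 ∨ i = -1 := by omega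
      rcases hi3 with rfl | rfl | rfl
      · cases e with
        | zero => exact absurd (by simpa using he.symm) hj
        | succ e => rw [← he, zero_pow (Nat.succ_ne_zero e)]
      · exact absurd (by simpa using he.symm) hj
      · rcases Nat.even_or_odd e with hpar | hpar
        · exact absurd (by rw [← he, hpar.neg_one_pow]) hj
        · rw [← he, hpar.neg_one_pow]
  · rw [bLoop_true_iff]
    constructor
    · rintro ⟨e, he⟩; exact ⟨e + 1, by rw [← he, pow_succ]; ring⟩
    · rintro ⟨e, he⟩
      cases e with
      | zero => exact absurd (by simpa using he.symm) hj
      | succ e => exact ⟨e, by rw [← he, pow_succ]; ring⟩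

-- ===== VERDICT (by name: the statement is the Claim_ definition above) =====
theorem is_power_of_spec : Claim_equal_is_power_of := by
  intro i j _
  unfold Spec_is_power_of
  have hA := A_true_iff i j
  have hB := B_true_iff i j
  cases ha : is_power_of i j <;> cases hb : is_power_of_alt i j <;> simp_all
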